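-- pv_equiv track=rewrite | github.com/yuyichao/srtctrl | lib/srt_comm/parse_cmd.py | _py_find_pair
-- ===== SOURCE A (Python) =====
-- def _py_to_str_end(string, start=0, endc='"'):
--     l = len(string)
--     _pass = False
--     for i in range(start, l):
--         if _pass:
--             _pass = False
--             continue
--         c = string[i]
--         if c == endc:
--             return i + 1
--         elif c == '\\':
--             _pass = True
--     return 0
--
-- def _py_find_pair(string, start=0):
--     l = len(string)
--     i = start
--     count = {'{}': 0,
--              '[]': 0,
--              '()': 0}
--     found = False
--     while i < l:
--         c = string[i]
--         if c in '"'"'":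
--             i = _py_to_str_end(string, i + 1, endc=c)
--             if i == 0:
--                 return start
--             continue
--         elif c == '{':
--             count['{}'] += 1
--         elif c == '}':
--             count['{}'] -= 1
--         elif c == '[':
--             count['[]'] += 1
--         elif c == ']':
--             count['[]'] -= 1
--         elif c == '(':
--             count['()'] += 1
--         elif c == ')':
--             count['()'] -= 1
--         i += 1
--         if count['{}'] or count['[]'] or count['()']:
--             found = True
--             if count['{}'] < 0 or count['[]'] < 0 or count['()'] < 0:
--                 return i
--         else:
--             if found:
--                 return i
--     return start
-- ===== SOURCE B (Python) =====
-- def _py_find_pair(string, start=0):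
--     l = len(string)
--     # pass 1: collect the positions/characters that lie outside quoted strings
--     sig = []
--     i = start
--     while i < l:
--         c = string[i]
--         if c in '"\'':
--             j = i + 1
--             esc = False
--             end = None
--             while j < l:
--                 if esc:
--                     esc = False
--                 elif string[j] == '\\':
--                     esc = True
--                 elif string[j] == c:
--                     end = j + 1
--                     break
--                 j += 1
--             if end is None:
--                 break
--             i = end
--         else:
--             sig.append((i, c))
--             i += 1
--     # pass 2: prefix-sum scan of the three bracket depths over the filtered list
--     curly = square = paren = 0
--     found = False
--     for pos, c in sig:
--         curly += (c == '{') - (c == '}')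
--         square += (c == '[') - (c == ']')
--         paren += (c == '(') - (c == ')')
--         if curly or square or paren:
--             found = True
--             if curly < 0 or square < 0 or paren < 0:
--                 return pos + 1
--         elif found:
--             return pos + 1
--     return start
-- ===== Notes on version B (the rewrite author's own statement) =====
-- stated objective: alternative
-- what changed: A's single interleaved while-loop (bracket dict updated in place, helper call to skip quoted strings) is replaced by two staged passes: pass 1 materialises the list of (position, char) pairs lying outside quoted strings, pass 2 folds a prefix-sum of the three bracket depths (computed arithmetically from boolean comparisons) over that list to find the first trigger position.
-- outside the precondition, e.g. on _py_find_pair("]''", -2): A returns -2, B returns 1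
import Mathlib
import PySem

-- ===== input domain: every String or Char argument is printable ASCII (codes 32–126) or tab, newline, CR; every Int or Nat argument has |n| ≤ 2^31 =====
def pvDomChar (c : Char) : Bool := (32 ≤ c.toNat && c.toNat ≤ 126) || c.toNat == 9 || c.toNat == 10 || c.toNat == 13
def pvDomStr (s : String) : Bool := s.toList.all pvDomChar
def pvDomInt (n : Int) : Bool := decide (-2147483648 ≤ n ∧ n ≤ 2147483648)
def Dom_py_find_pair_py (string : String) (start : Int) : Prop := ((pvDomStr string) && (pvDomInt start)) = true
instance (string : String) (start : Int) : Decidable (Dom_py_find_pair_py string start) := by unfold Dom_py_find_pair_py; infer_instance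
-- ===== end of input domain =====

-- B replaces A's single interleaved loop (dict counters + string-skip helper) by two staged
-- passes: collect the unquoted (position, char) pairs, then prefix-sum-scan the bracket depths
-- over that list (objective: alternative; return value only — no mutation).
-- The while-loops are ported with a fuel parameter large enough never to run out on the
-- admitted inputs (i strictly increases each iteration, so len - start + 1 steps suffice).

-- ===== PORT A =====
-- _py_to_str_end's body: a for-loop over range(start, l) with the `_pass` flag
def pyToStrEndGo (s : String) (endc : Char) : Bool → List Int → Int
  | _, [] => 0
  | true, _ :: rest => pyToStrEndGo s endc false rest
  | false, i :: rest =>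
    match PySem.Str.pyGet? s i with
    | none => 0              -- IndexError (unreachable: range(start, l) indices are in range)
    | some c =>
      if c = endc then i + 1
      else if c = '\\' then pyToStrEndGo s endc true rest
      else pyToStrEndGo s endc false rest

def pyToStrEnd (s : String) (start : Int) (endc : Char) : Int :=
  pyToStrEndGo s endc false (PySem.List.pyRange start (PySem.Str.len s))

-- the main while-loop of _py_find_pair
def pyFindPairLoop (s : String) (start : Int) : PySem.Dict String Int → Bool → Int → Nat → Int
  | _, _, _, 0 => start      -- fuel exhausted (never on the admitted inputs)
  | count, found, i, n + 1 =>
    if i < PySem.Str.len s then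
      match PySem.Str.pyGet? s i with
      | none => start        -- IndexError (only reachable for i < -len; outside Pre_)
      | some c =>
        if c = '"' ∨ c = '\'' then
          let j := pyToStrEnd s (i + 1) c
          if j = 0 then start else pyFindPairLoop s start count found j n
        else
          let count :=
            if c = '{' then count.modify "{}" 0 (· + 1)
            else if c = '}' then count.modify "{}" 0 (· - 1)
            else if c = '[' then count.modify "[]" 0 (· + 1)
            else if c = ']' then count.modify "[]" 0 (· - 1)
            else if c = '(' then count.modify "()" 0 (· + 1)
            else if c = ')' then count.modify "()" 0 (· - 1)
            else count
          if count.getD "{}" 0 ≠ 0 ∨ count.getD "[]" 0 ≠ 0 ∨ count.getD "()" 0 ≠ 0 then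
            if count.getD "{}" 0 < 0 ∨ count.getD "[]" 0 < 0 ∨ count.getD "()" 0 < 0 then i + 1
            else pyFindPairLoop s start count true (i + 1) n
          else
            if found then i + 1
            else pyFindPairLoop s start count found (i + 1) n
    else start

def py_find_pair_py (string : String) (start : Int) : Int :=
  pyFindPairLoop string start (PySem.Dict.ofList [("{}", 0), ("[]", 0), ("()", 0)]) false start
    ((PySem.Str.len string - start).toNat + 1)

-- ===== PORT B =====
-- inner while-loop of pass 1: `end` (index after the closing quote), or none
def scanStrEnd (s : String) (c : Char) : Bool → Int → Nat → Option Int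
  | _, _, 0 => none          -- fuel exhausted (never on the admitted inputs)
  | esc, j, n + 1 =>
    if j < PySem.Str.len s then
      if esc then scanStrEnd s c false (j + 1) n
      else
        match PySem.Str.pyGet? s j with
        | none => none       -- unreachable for j ≥ 0
        | some d =>
          if d = '\\' then scanStrEnd s c true (j + 1) n
          else if d = c then some (j + 1)
          else scanStrEnd s c false (j + 1) n
    else none

-- pass 1: the (position, char) pairs outside quoted strings, from index i on
def collectSig (s : String) : Int → Nat → List (Int × Char)
  | _, 0 => []               -- fuel exhausted (never on the admitted inputs)
  | i, n + 1 =>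
    if i < PySem.Str.len s then
      match PySem.Str.pyGet? s i with
      | none => []           -- IndexError in Source B (i < -len; outside Pre_)
      | some c =>
        if c = '"' ∨ c = '\'' then
          match scanStrEnd s c false (i + 1) ((PySem.Str.len s - (i + 1)).toNat + 1) with
          | none => []
          | some e => collectSig s e n
        else (i, c) :: collectSig s (i + 1) n
    else []

-- pass 2: prefix-sum scan of the three depths over the filtered list
def scanSig (start : Int) (curly square paren : Int) (found : Bool) :
    List (Int × Char) → Int
  | [] => start
  | (pos, c) :: rest =>
    let curly := curly + (if c = '{' then 1 else 0) - (if c = '}' then 1 else 0)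
    let square := square + (if c = '[' then 1 else 0) - (if c = ']' then 1 else 0)
    let paren := paren + (if c = '(' then 1 else 0) - (if c = ')' then 1 else 0)
    if curly ≠ 0 ∨ square ≠ 0 ∨ paren ≠ 0 then
      if curly < 0 ∨ square < 0 ∨ paren < 0 then pos + 1
      else scanSig start curly square paren true rest
    else
      if found then pos + 1
      else scanSig start curly square paren found rest

def py_find_pair_py_alt (string : String) (start : Int) : Int :=
  scanSig start 0 0 0 false
    (collectSig string start ((PySem.Str.len string - start).toNat + 1))

-- ===== PRECONDITION & SPEC =====
-- Pre_ excludes negative start: Python's negative-index wraparound there is an accident of the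
-- implementation (A scans tail characters twice and its helper's 0 sentinel makes a closing quote
-- at index -1 count as an unterminated string), and A raises IndexError for start < -len(string).
def Pre_py_find_pair_py (string : String) (start : Int) : Prop := 0 ≤ start
instance (string : String) (start : Int) : Decidable (Pre_py_find_pair_py string start) := by
  unfold Pre_py_find_pair_py; infer_instance

def pvWitness_py_find_pair_py : String × Int := ("a('b c') d", 0)

def Spec_py_find_pair_py (string : String) (start : Int) (out : Int) : Prop := out = py_find_pair_py_alt string start
instance (string : String) (start : Int) (out : Int) : Decidable (Spec_py_find_pair_py string start out) := by unfold Spec_py_find_pair_py; infer_instance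

-- ===== CLAIM =====
def Claim_equal_py_find_pair_py : Prop := ∀ (string : String) (start : Int), Dom_py_find_pair_py string start → Pre_py_find_pair_py string start → Spec_py_find_pair_py string start (py_find_pair_py string start)

-- ===== LEMMAS AND PROOFS =====

-- a nonnegative index below len is in range
theorem pyGet?_isSome_of_lt (s : String) (i : Int) (h0 : 0 ≤ i) (h : i < PySem.Str.len s) :
    ∃ c, PySem.Str.pyGet? s i = some c := by
  lift i to Nat using h0 with n
  rw [PySem.Str.len_eq] at h
  have hn : n < s.toList.length := by exact_mod_cast h
  exact ⟨s.toList[n], by simp [List.getElem?_eq_getElem hn]⟩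

-- scanStrEnd only returns indices past its starting point
theorem scanStrEnd_bound (s : String) (c : Char) :
    ∀ (n : Nat) (esc : Bool) (j e : Int), scanStrEnd s c esc j n = some e → j < e := by
  intro n
  induction n with
  | zero => intro esc j e he; cases he
  | succ n ih =>
    intro esc j e he
    rw [scanStrEnd] at he
    by_cases hlt : j < PySem.Str.len s
    · rw [if_pos hlt] at he
      cases esc with
      | true =>
        rw [if_pos rfl] at he
        have := ih false (j + 1) e he
        omega
      | false =>
        rw [if_neg (by decide)] at he
        cases hg : PySem.Str.pyGet? s j with
        | none => rw [hg] at he; cases he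
        | some d =>
          simp only [hg] at he
          by_cases hbs : d = '\\'
          · rw [if_pos hbs] at he
            have := ih true (j + 1) e he
            omega
          · rw [if_neg hbs] at he
            by_cases hdc : d = c
            · rw [if_pos hdc] at he
              cases he
              omega
            · rw [if_neg hdc] at he
              have := ih false (j + 1) e he
              omega
    · rw [if_neg hlt] at he
      cases he

-- B's inner quote scan computes exactly A's helper (0 sentinel ↔ none) for j ≥ 0,
-- enough fuel, and a non-backslash delimiter (the only delimiters used are the quotes)
theorem scanStrEnd_eq (s : String) (c : Char) (hcb : ¬ c = '\\') :
    ∀ (n : Nat) (esc : Bool) (j : Int), 0 ≤ j → (PySem.Str.len s - j).toNat < n →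
      pyToStrEndGo s c esc (PySem.List.pyRange j (PySem.Str.len s)) =
        (scanStrEnd s c esc j n).getD 0 := by
  intro n
  induction n with
  | zero => intro esc j h0 hn; omega
  | succ n ih =>
    intro esc j h0 hn
    rw [scanStrEnd]
    by_cases hlt : j < PySem.Str.len s
    · rw [if_pos hlt, PySem.List.pyRange_one_cons hlt]
      obtain ⟨d, hd⟩ := pyGet?_isSome_of_lt s j h0 hlt
      cases esc with
      | true =>
        rw [if_pos rfl, pyToStrEndGo]
        exact ih false (j + 1) (by omega) (by omega)
      | false =>
        rw [if_neg (by decide), pyToStrEndGo]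
        simp only [hd]
        by_cases hbs : d = '\\'
        · rw [if_pos hbs, if_neg (by rw [hbs]; exact fun hh => hcb hh.symm), if_pos hbs]
          exact ih true (j + 1) (by omega) (by omega)
        · rw [if_neg hbs]
          by_cases hdc : d = c
          · rw [if_pos hdc, if_neg hbs, if_pos hdc]
            rfl
          · rw [if_neg hdc, if_neg hdc, if_neg hbs]
            exact ih false (j + 1) (by omega) (by omega)
    · rw [if_neg hlt]
      have : PySem.List.pyRange j (PySem.Str.len s) = [] := by
        rw [PySem.List.pyRange_one]
        have : (PySem.Str.len s - j).toNat = 0 := by omega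
        rw [this]
        rfl
      rw [this, pyToStrEndGo]
      rfl

-- A's fused loop equals B's staged pipeline on the same fuel: scanSig over collectSig,
-- B's three counters tracking A's dict entries
theorem loop_eq (s : String) (start : Int) :
    ∀ (n : Nat) (i : Int) (count : PySem.Dict String Int) (found : Bool), 0 ≤ i →
      pyFindPairLoop s start count found i n =
        scanSig start (count.getD "{}" 0) (count.getD "[]" 0) (count.getD "()" 0)
          found (collectSig s i n) := by
  intro n
  induction n with
  | zero =>
    intro i count found h0
    rw [pyFindPairLoop, collectSig, scanSig]
  | succ n ih =>
    intro i count found h0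
    rw [pyFindPairLoop, collectSig]
    by_cases hlt : i < PySem.Str.len s
    · rw [if_pos hlt, if_pos hlt]
      obtain ⟨c, hc⟩ := pyGet?_isSome_of_lt s i h0 hlt
      simp only [hc]
      by_cases hquote : c = '"' ∨ c = '\''
      · rw [if_pos hquote, if_pos hquote]
        have hcb : ¬ c = '\\' := by rcases hquote with h | h <;> simp [h]
        have hje : pyToStrEnd s (i + 1) c =
            (scanStrEnd s c false (i + 1) ((PySem.Str.len s - (i + 1)).toNat + 1)).getD 0 :=
          scanStrEnd_eq s c hcb ((PySem.Str.len s - (i + 1)).toNat + 1) false (i + 1)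
            (by omega) (by omega)
        cases hE : scanStrEnd s c false (i + 1) ((PySem.Str.len s - (i + 1)).toNat + 1) with
        | none =>
          rw [hE] at hje
          simp only [hje, Option.getD_none, scanSig]
          simp
        | some e =>
          rw [hE] at hje
          have hbe := scanStrEnd_bound s c ((PySem.Str.len s - (i + 1)).toNat + 1)
            false (i + 1) e hE
          simp only [hje, Option.getD_some]
          rw [if_neg (show ¬ e = 0 by omega)]
          exact ih e count found (by omega)
      · rw [if_neg hquote, if_neg hquote, scanSig]
        have tail : ∀ (d : PySem.Dict String Int) (a b c2 : Int),
            d.getD "{}" 0 = a → d.getD "[]" 0 = b → d.getD "()" 0 = c2 →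
            (if a ≠ 0 ∨ b ≠ 0 ∨ c2 ≠ 0 then
               (if a < 0 ∨ b < 0 ∨ c2 < 0 then i + 1 else pyFindPairLoop s start d true (i + 1) n)
             else if found = true then i + 1 else pyFindPairLoop s start d found (i + 1) n)
            = (if a ≠ 0 ∨ b ≠ 0 ∨ c2 ≠ 0 then
               (if a < 0 ∨ b < 0 ∨ c2 < 0 then i + 1
                else scanSig start a b c2 true (collectSig s (i + 1) n))
             else if found = true then i + 1
                  else scanSig start a b c2 found (collectSig s (i + 1) n)) := by
          intro d a b c2 e1 e2 e3
          have r1 := ih (i + 1) d true (by omega)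
          rw [e1, e2, e3] at r1
          have r2 := ih (i + 1) d found (by omega)
          rw [e1, e2, e3] at r2
          split_ifs <;> first | rfl | exact r1 | exact r2
        by_cases h1 : c = '{'
        · simp only [h1, reduceIte]
          have eS : (count.modify "{}" 0 fun x => x + 1).getD "{}" 0 = count.getD "{}" 0 + 1 :=
            PySem.Dict.getD_modify_self ..
          have eA : (count.modify "{}" 0 fun x => x + 1).getD "[]" 0 = count.getD "[]" 0 :=
            PySem.Dict.getD_modify_of_ne _ _ _ (by decide)
          have eB : (count.modify "{}" 0 fun x => x + 1).getD "()" 0 = count.getD "()" 0 :=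
            PySem.Dict.getD_modify_of_ne _ _ _ (by decide)
          rw [eS, eA, eB]
          have := tail _ _ _ _ eS eA eB
          simpa using this
        · simp only [h1, reduceIte]
          by_cases h2 : c = '}'
          · simp only [h2, reduceIte]
            have eS : (count.modify "{}" 0 fun x => x - 1).getD "{}" 0 = count.getD "{}" 0 - 1 :=
              PySem.Dict.getD_modify_self ..
            have eA : (count.modify "{}" 0 fun x => x - 1).getD "[]" 0 = count.getD "[]" 0 :=
              PySem.Dict.getD_modify_of_ne _ _ _ (by decide)
            have eB : (count.modify "{}" 0 fun x => x - 1).getD "()" 0 = count.getD "()" 0 :=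
              PySem.Dict.getD_modify_of_ne _ _ _ (by decide)
            rw [eS, eA, eB]
            have := tail _ _ _ _ eS eA eB
            simpa using this
          · simp only [h2, reduceIte]
            by_cases h3 : c = '['
            · simp only [h3, reduceIte]
              have eS : (count.modify "[]" 0 fun x => x + 1).getD "[]" 0 = count.getD "[]" 0 + 1 :=
                PySem.Dict.getD_modify_self ..
              have eA : (count.modify "[]" 0 fun x => x + 1).getD "{}" 0 = count.getD "{}" 0 :=
                PySem.Dict.getD_modify_of_ne _ _ _ (by decide)
              have eB : (count.modify "[]" 0 fun x => x + 1).getD "()" 0 = count.getD "()" 0 :=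
                PySem.Dict.getD_modify_of_ne _ _ _ (by decide)
              rw [eS, eA, eB]
              have := tail _ _ _ _ eA eS eB
              simpa using this
            · simp only [h3, reduceIte]
              by_cases h4 : c = ']'
              · simp only [h4, reduceIte]
                have eS : (count.modify "[]" 0 fun x => x - 1).getD "[]" 0 = count.getD "[]" 0 - 1 :=
                  PySem.Dict.getD_modify_self ..
                have eA : (count.modify "[]" 0 fun x => x - 1).getD "{}" 0 = count.getD "{}" 0 :=
                  PySem.Dict.getD_modify_of_ne _ _ _ (by decide)
                have eB : (count.modify "[]" 0 fun x => x - 1).getD "()" 0 = count.getD "()" 0 :=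
                  PySem.Dict.getD_modify_of_ne _ _ _ (by decide)
                rw [eS, eA, eB]
                have := tail _ _ _ _ eA eS eB
                simpa using this
              · simp only [h4, reduceIte]
                by_cases h5 : c = '('
                · simp only [h5, reduceIte]
                  have eS : (count.modify "()" 0 fun x => x + 1).getD "()" 0 = count.getD "()" 0 + 1 :=
                    PySem.Dict.getD_modify_self ..
                  have eA : (count.modify "()" 0 fun x => x + 1).getD "{}" 0 = count.getD "{}" 0 :=
                    PySem.Dict.getD_modify_of_ne _ _ _ (by decide)
                  have eB : (count.modify "()" 0 fun x => x + 1).getD "[]" 0 = count.getD "[]" 0 :=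
                    PySem.Dict.getD_modify_of_ne _ _ _ (by decide)
                  rw [eS, eA, eB]
                  have := tail _ _ _ _ eA eB eS
                  simpa using this
                · simp only [h5, reduceIte]
                  by_cases h6 : c = ')'
                  · simp only [h6, reduceIte]
                    have eS : (count.modify "()" 0 fun x => x - 1).getD "()" 0 = count.getD "()" 0 - 1 :=
                      PySem.Dict.getD_modify_self ..
                    have eA : (count.modify "()" 0 fun x => x - 1).getD "{}" 0 = count.getD "{}" 0 :=
                      PySem.Dict.getD_modify_of_ne _ _ _ (by decide)
                    have eB : (count.modify "()" 0 fun x => x - 1).getD "[]" 0 = count.getD "[]" 0 :=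
                      PySem.Dict.getD_modify_of_ne _ _ _ (by decide)
                    rw [eS, eA, eB]
                    have := tail _ _ _ _ eA eB eS
                    simpa using this
                  · simp only [h6, reduceIte]
                    have := tail count _ _ _ rfl rfl rfl
                    simpa using this
    · rw [if_neg hlt, if_neg hlt, scanSig]

-- ===== VERDICT =====
theorem py_find_pair_py_spec : Claim_equal_py_find_pair_py := by
  intro s start _hdom hpre
  unfold Spec_py_find_pair_py py_find_pair_py py_find_pair_py_alt
  have h := loop_eq s start ((PySem.Str.len s - start).toNat + 1) start
    (PySem.Dict.ofList [("{}", 0), ("[]", 0), ("()", 0)]) false hpre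
  simpa using h
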